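-- pv_equiv track=rewrite | github.com/bugpigg/algorithm_python | fromSchool/작은것들을위한시/Main.py | solve
-- ===== SOURCE A (Python) =====
-- def solve(A):
--     ans = 0
--     s = 0
--     temp = []
--     for a in A:
--         b = 1
--         while len(temp) != 0:
--             if temp[-1][1] >= a:
--                 b_,a_ = temp.pop()
--                 s -= a_*b_
--                 b += b_
--             else:
--                 break
--         temp.append([b,a])
--         s += a * b
--         ans += s
--     return ans
-- ===== SOURCE B (Python) =====
-- def solve(A):
--     # For each prefix end, scan backwards maintaining the running minimum,
--     # summing min(A[j..i]) for every window ending at i.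
--     ans = 0
--     seen = []
--     for a in A:
--         seen.append(a)
--         m = a
--         for x in reversed(seen):
--             if x < m:
--                 m = x
--             ans += m
--     return ans
-- ===== Notes on version B (the rewrite author's own statement) =====
-- stated objective: simpler
-- what changed: Replaces the monotonic stack with grouped counts and an incrementally maintained segment sum by a plain nested loop that, for each prefix end, rescans the prefix backwards with a running minimum and adds each window minimum directly.
import Mathlib
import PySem

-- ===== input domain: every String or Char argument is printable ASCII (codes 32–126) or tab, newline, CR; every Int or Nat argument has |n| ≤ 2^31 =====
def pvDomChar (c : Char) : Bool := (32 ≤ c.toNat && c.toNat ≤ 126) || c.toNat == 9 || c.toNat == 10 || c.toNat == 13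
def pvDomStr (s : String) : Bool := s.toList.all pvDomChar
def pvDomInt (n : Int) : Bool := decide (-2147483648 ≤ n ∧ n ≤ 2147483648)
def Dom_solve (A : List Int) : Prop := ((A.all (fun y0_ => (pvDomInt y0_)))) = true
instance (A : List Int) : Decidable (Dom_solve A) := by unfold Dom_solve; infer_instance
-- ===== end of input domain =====

-- B replaces A's monotonic stack (grouped counts + incremental segment sum) by a plain
-- quadratic backwards rescan with a running minimum: simpler, not faster.

-- ===== PORT A =====
-- the inner `while` loop of A: stack top is the HEAD of `temp` (Python's temp[-1])
def popLoop : List (Int × Int) → Int → Int → Int → Int × Int × List (Int × Int)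
  | [], _, b, s => (b, s, [])
  | (b_, a_) :: rest, a, b, s =>
    if a ≤ a_ then popLoop rest a (b + b_) (s - a_ * b_)
    else (b, s, (b_, a_) :: rest)

def stepA (st : Int × Int × List (Int × Int)) (a : Int) : Int × Int × List (Int × Int) :=
  match st with
  | (ans, s, temp) =>
    match popLoop temp a 1 s with
    | (b, s1, temp1) => (ans + (s1 + a * b), s1 + a * b, (b, a) :: temp1)

def solve (A : List Int) : Int := (A.foldl stepA (0, 0, [])).1

-- ===== PORT B =====
-- inner loop of B: running minimum m over the reversed prefix, adding it at each step
def altInner : Int → Int → List Int → Int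
  | _, ans, [] => ans
  | m, ans, x :: rest =>
    let m' := if x < m then x else m
    altInner m' (ans + m') rest

-- `seenRev` is B's `seen` kept in reverse order, so `reversed(seen)` = `a :: seenRev`
def altGo : Int → List Int → List Int → Int
  | ans, _, [] => ans
  | ans, seenRev, a :: rest => altGo (altInner a ans (a :: seenRev)) (a :: seenRev) rest

def solve_alt (A : List Int) : Int := altGo 0 [] A

-- ===== PRECONDITION & SPEC =====
def Spec_solve (A : List Int) (out : Int) : Prop := out = solve_alt A
instance (A : List Int) (out : Int) : Decidable (Spec_solve A out) := by unfold Spec_solve; infer_instance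

-- ===== CLAIM (what is proved, stated in full; the proofs are below) =====
def Claim_equal_solve : Prop := ∀ (A : List Int), Dom_solve A → Spec_solve A (solve A)

-- ===== LEMMAS AND PROOFS =====

-- cumulative minima of a list (first element, then running minima)
def cmW : Int → List Int → List Int
  | _, [] => []
  | m, x :: xs => min x m :: cmW (min x m) xs

def cm : List Int → List Int
  | [] => []
  | x :: xs => x :: cmW x xs

def sumFst (t : List (Int × Int)) : Int := (t.map Prod.fst).sum
def sumProd (t : List (Int × Int)) : Int := (t.map (fun p => p.1 * p.2)).sum
def expand (t : List (Int × Int)) : List Int := t.flatMap (fun p => List.replicate p.1.toNat p.2)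

def SInv (r : List Int) (temp : List (Int × Int)) (s : Int) : Prop :=
  (∀ p ∈ temp, 1 ≤ p.1) ∧ temp.Pairwise (fun p q => q.2 < p.2) ∧
    expand temp = cm r ∧ s = sumProd temp

theorem altInner_eq (l : List Int) : ∀ m ans, altInner m ans l = ans + (cmW m l).sum := by
  induction l with
  | nil => intro m ans; simp [altInner, cmW]
  | cons x xs ih =>
    intro m ans
    have hmin : (if x < m then x else m) = min x m := by
      rcases lt_or_ge x m with h | h <;> simp [min_def] <;> omega
    simp only [altInner, cmW, hmin, ih]
    simp [List.sum_cons]; ring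

theorem cmW_eq_map (l : List Int) : ∀ m, cmW m l = (cm l).map (fun v => min m v) := by
  induction l with
  | nil => intro m; simp [cmW, cm]
  | cons x xs ih =>
    intro m
    simp only [cmW, cm, List.map_cons]
    rw [ih (min x m), ih x, List.map_map]
    congr 1
    · omega
    · apply List.map_congr_left
      intro v _
      simp only [Function.comp]
      omega

theorem cm_cons (a : Int) (r : List Int) : cm (a :: r) = a :: (cm r).map (fun v => min a v) := by
  cases r with
  | nil => simp [cm, cmW]
  | cons x xs =>
    show a :: cmW a (x :: xs) = _
    rw [cmW_eq_map]

theorem popLoop_spec (a : Int) : ∀ (t : List (Int × Int)) (b s : Int),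
    popLoop t a b s =
      (b + sumFst (t.takeWhile (fun p => decide (a ≤ p.2))),
       s - sumProd (t.takeWhile (fun p => decide (a ≤ p.2))),
       t.dropWhile (fun p => decide (a ≤ p.2))) := by
  intro t
  induction t with
  | nil => intro b s; simp [popLoop, sumFst, sumProd]
  | cons p rest ih =>
    intro b s
    obtain ⟨b_, a_⟩ := p
    by_cases h : a ≤ a_
    · simp only [popLoop, if_pos h, ih, List.takeWhile, List.dropWhile]
      simp [h, sumFst, sumProd]
      constructor <;> ring
    · simp [popLoop, List.takeWhile, List.dropWhile, h, sumFst, sumProd]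

theorem expand_len (t : List (Int × Int)) (h : ∀ p ∈ t, 0 ≤ p.1) :
    ((expand t).length : Int) = sumFst t := by
  induction t with
  | nil => simp [expand, sumFst]
  | cons p rest ih =>
    have hp : 0 ≤ p.1 := h p (by simp)
    have := ih (fun q hq => h q (by simp [hq]))
    simp only [expand, List.flatMap_cons, List.length_append, List.length_replicate] at *
    simp [sumFst] at *
    omega

theorem expand_sum (t : List (Int × Int)) (h : ∀ p ∈ t, 0 ≤ p.1) :
    (expand t).sum = sumProd t := by
  induction t with
  | nil => simp [expand, sumProd]
  | cons p rest ih =>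
    have hp : 0 ≤ p.1 := h p (by simp)
    have := ih (fun q hq => h q (by simp [hq]))
    simp only [expand, List.flatMap_cons, List.sum_append, List.sum_replicate] at *
    simp [sumProd] at *
    rw [this, max_eq_left hp]

theorem mem_expand {x : Int} {t : List (Int × Int)} (h : x ∈ expand t) :
    ∃ p ∈ t, x = p.2 := by
  simp only [expand, List.mem_flatMap] at h
  obtain ⟨p, hp, hx⟩ := h
  exact ⟨p, hp, List.eq_of_mem_replicate hx⟩

theorem dropWhile_snd_lt (a : Int) : ∀ (t : List (Int × Int)),
    t.Pairwise (fun p q => q.2 < p.2) →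
    ∀ q ∈ t.dropWhile (fun p => decide (a ≤ p.2)), q.2 < a := by
  intro t
  induction t with
  | nil => intro _ q hq; simp [List.dropWhile] at hq
  | cons p rest ih =>
    intro hpw q hq
    rcases List.pairwise_cons.mp hpw with ⟨hhead, htail⟩
    by_cases h : a ≤ p.2
    · rw [List.dropWhile_cons, if_pos (by simpa using h)] at hq
      exact ih htail q hq
    · rw [List.dropWhile_cons, if_neg (by simpa using h)] at hq
      rcases List.mem_cons.mp hq with rfl | hmem
      · omega
      · have := hhead q hmem; omega

theorem step_inv {r : List Int} {temp : List (Int × Int)} {s : Int} (a ans : Int)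
    (h : SInv r temp s) :
    ∃ s' temp', stepA (ans, s, temp) a = (ans + s', s', temp') ∧ SInv (a :: r) temp' s' := by
  obtain ⟨hpos, hpw, hexp, hs⟩ := h
  set P : Int × Int → Bool := fun p => decide (a ≤ p.2) with hP
  set tw := temp.takeWhile P with htw
  set dw := temp.dropWhile P with hdw
  have hsplit : tw ++ dw = temp := List.takeWhile_append_dropWhile
  have htwmem : ∀ p ∈ tw, p ∈ temp := fun p hp => by
    rw [← hsplit]; exact List.mem_append_left _ hp
  have hdwmem : ∀ p ∈ dw, p ∈ temp := fun p hp => by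
    rw [← hsplit]; exact List.mem_append_right _ hp
  have htwpos : ∀ p ∈ tw, 1 ≤ p.1 := fun p hp => hpos p (htwmem p hp)
  have hdwpos : ∀ p ∈ dw, 1 ≤ p.1 := fun p hp => hpos p (hdwmem p hp)
  have hSnn : 0 ≤ sumFst tw := by
    rw [← expand_len tw (fun p hp => le_trans (by norm_num) (htwpos p hp))]
    positivity
  refine ⟨(s - sumProd tw) + a * (1 + sumFst tw), (1 + sumFst tw, a) :: dw, ?_, ?_, ?_, ?_, ?_⟩
  · simp only [stepA, popLoop_spec, ← hP, ← htw, ← hdw]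
  · intro p hp
    rcases List.mem_cons.mp hp with rfl | hmem
    · simp; omega
    · exact hdwpos p hmem
  · rw [List.pairwise_cons]
    refine ⟨fun q hq => dropWhile_snd_lt a temp hpw q hq, ?_⟩
    exact List.Pairwise.sublist (List.dropWhile_sublist _) hpw
  · -- expand temp' = cm (a :: r)
    rw [cm_cons, ← hexp]
    have hsplitE : expand temp = expand tw ++ expand dw := by
      rw [← hsplit, expand, List.flatMap_append]; rfl
    have htwA : ∀ x ∈ expand tw, a ≤ x := by
      intro x hx
      obtain ⟨p, hp, rfl⟩ := mem_expand hx
      have := List.mem_takeWhile_imp hp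
      simpa [hP] using this
    have hdwA : ∀ x ∈ expand dw, x < a := by
      intro x hx
      obtain ⟨p, hp, rfl⟩ := mem_expand hx
      exact dropWhile_snd_lt a temp hpw p hp
    have hmapT : (expand tw).map (fun v => min a v) = List.replicate (expand tw).length a := by
      rw [List.eq_replicate_iff]
      refine ⟨by simp, ?_⟩
      intro x hx
      simp only [List.mem_map] at hx
      obtain ⟨v, hv, rfl⟩ := hx
      have := htwA v hv; omega
    have hmapD : (expand dw).map (fun v => min a v) = expand dw := by
      conv_rhs => rw [← List.map_id (expand dw)]
      apply List.map_congr_left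
      intro v hv
      have := hdwA v hv
      show min a v = v
      omega
    have hlen : (expand tw).length = (sumFst tw).toNat := by
      have := expand_len tw (fun p hp => le_trans (by norm_num) (htwpos p hp))
      omega
    have hrep : (1 + sumFst tw).toNat = (sumFst tw).toNat + 1 := by omega
    rw [hsplitE, List.map_append, hmapT, hmapD, hlen]
    have hconsE : expand ((1 + sumFst tw, a) :: dw)
        = List.replicate (1 + sumFst tw).toNat a ++ expand dw := by
      rw [expand, List.flatMap_cons]; rfl
    rw [hconsE, hrep, List.replicate_succ, List.cons_append]
  · -- s' = sumProd temp'
    have hsum : sumProd temp = sumProd tw + sumProd dw := by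
      rw [← hsplit]; simp [sumProd]
    rw [hs, hsum]
    simp only [sumProd, List.map_cons, List.sum_cons]
    ring

theorem main_loop : ∀ (l : List Int) (ans s : Int) (temp : List (Int × Int)) (r : List Int),
    SInv r temp s → (l.foldl stepA (ans, s, temp)).1 = altGo ans r l := by
  intro l
  induction l with
  | nil => intro ans s temp r _; simp [altGo]
  | cons a rest ih =>
    intro ans s temp r hInv
    obtain ⟨s', temp', hstep, hInv'⟩ := step_inv a ans hInv
    have hinner : altInner a ans (a :: r) = ans + s' := by
      rw [altInner_eq]
      have h1 : cmW a (a :: r) = cm (a :: r) := by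
        simp only [cmW, cm, min_self]
      rw [h1]
      have h2 : (cm (a :: r)).sum = s' := by
        obtain ⟨hpos', _, hexp', hs'⟩ := hInv'
        rw [← hexp', expand_sum temp' (fun p hp => le_trans (by norm_num) (hpos' p hp)), hs']
      rw [h2]
    rw [List.foldl_cons, hstep, altGo.eq_def]
    simp only [hinner]
    exact ih (ans + s') s' temp' (a :: r) hInv'

-- ===== VERDICT (by name: the statement is the Claim_ definition above) =====
theorem solve_spec : Claim_equal_solve := by
  intro A _
  unfold Spec_solve solve solve_alt
  apply main_loop
  refine ⟨by simp, by simp, by simp [expand, cm], by simp [sumProd]⟩
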